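-- pv_equiv track=rewrite | github.com/fossouo/datamesh-ai | datamesh-ai-examples/quickstart/agents/catalog-agent/main.py | _extract_tables_from_question
-- ===== SOURCE A (Python) =====
-- from typing import Any, Dict, List, Optional
--
-- def _extract_tables_from_question(question: str) -> List[str]:
--     """Extract table references from a natural language question."""
--     question_lower = question.lower()
--     detected = []
--
--     # Simple keyword matching for demo
--     keywords_to_tables = {
--         "revenue": "revenue",
--         "sales": "revenue",
--         "income": "revenue",
--         "region": "regions",
--         "geography": "regions",
--         "country": "regions",
--         "time": "time_periods",
--         "month": "time_periods",
--         "year": "time_periods",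
--         "quarter": "time_periods",
--         "customer": "customers",
--         "client": "customers",
--         "transaction": "transactions",
--         "purchase": "transactions",
--         "order": "transactions"
--     }
--
--     for keyword, table in keywords_to_tables.items():
--         if keyword in question_lower and table not in detected:
--             detected.append(table)
--
--     return detected
-- ===== SOURCE B (Python) =====
-- from typing import List
--
-- _TABLE_SYNONYMS = [
--     ("revenue", ["revenue", "sales", "income"]),
--     ("regions", ["region", "geography", "country"]),
--     ("time_periods", ["time", "month", "year", "quarter"]),
--     ("customers", ["customer", "client"]),
--     ("transactions", ["transaction", "purchase", "order"]),
-- ]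
--
-- def _extract_tables_from_question(question: str) -> List[str]:
--     """Extract table references from a natural language question."""
--     q = question.lower()
--     return [table for table, kws in _TABLE_SYNONYMS
--             if any(kw in q for kw in kws)]
-- ===== Notes on version B (the rewrite author's own statement) =====
-- stated objective: simpler
-- what changed: B inverts the keyword->table map into a table->synonyms list and emits each table once via any(); the dedup membership guard and the append-accumulator loop disappear, replaced by a single comprehension.
import Mathlib
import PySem

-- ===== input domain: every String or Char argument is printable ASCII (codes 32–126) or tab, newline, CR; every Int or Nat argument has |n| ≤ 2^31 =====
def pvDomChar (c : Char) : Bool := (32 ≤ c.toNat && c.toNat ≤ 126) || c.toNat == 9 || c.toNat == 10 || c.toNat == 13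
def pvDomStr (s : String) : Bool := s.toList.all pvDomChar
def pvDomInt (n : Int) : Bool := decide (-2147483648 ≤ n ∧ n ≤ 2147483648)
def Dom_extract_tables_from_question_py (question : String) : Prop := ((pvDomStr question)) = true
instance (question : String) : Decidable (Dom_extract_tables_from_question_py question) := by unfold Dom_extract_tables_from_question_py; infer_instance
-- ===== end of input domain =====

-- B: inverted table -> synonyms list with a single comprehension (simpler; same output and order).


-- ===== PORT A =====
def extract_tables_from_question_py (question : String) : List String :=
  let question_lower := PySem.Str.lower question
  -- the dict literal has 15 distinct keys, so dict.items() is exactly this list in insertion order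
  let keywords_to_tables : List (String × String) :=
    [("revenue", "revenue"), ("sales", "revenue"), ("income", "revenue"),
     ("region", "regions"), ("geography", "regions"), ("country", "regions"),
     ("time", "time_periods"), ("month", "time_periods"), ("year", "time_periods"),
     ("quarter", "time_periods"),
     ("customer", "customers"), ("client", "customers"),
     ("transaction", "transactions"), ("purchase", "transactions"), ("order", "transactions")]
  keywords_to_tables.foldl (fun detected kt =>
    if PySem.Str.isIn kt.1 question_lower && !(detected.contains kt.2)
    then detected ++ [kt.2] else detected) []

-- ===== PORT B =====
def pvTableSynonyms : List (String × List String) :=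
  [("revenue", ["revenue", "sales", "income"]),
   ("regions", ["region", "geography", "country"]),
   ("time_periods", ["time", "month", "year", "quarter"]),
   ("customers", ["customer", "client"]),
   ("transactions", ["transaction", "purchase", "order"])]

def extract_tables_from_question_py_alt (question : String) : List String :=
  let q := PySem.Str.lower question
  (pvTableSynonyms.filter (fun tk => tk.2.any (fun kw => PySem.Str.isIn kw q))).map (fun tk => tk.1)

-- ===== PRECONDITION & SPEC =====
def Spec_extract_tables_from_question_py (question : String) (out : List String) : Prop := out = extract_tables_from_question_py_alt question
instance (question : String) (out : List String) : Decidable (Spec_extract_tables_from_question_py question out) := by unfold Spec_extract_tables_from_question_py; infer_instance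

-- ===== CLAIM (what is proved, stated in full; the proofs are below) =====
def Claim_equal_extract_tables_from_question_py : Prop := ∀ (question : String), Dom_extract_tables_from_question_py question → Spec_extract_tables_from_question_py question (extract_tables_from_question_py question)

-- ===== LEMMAS AND PROOFS =====

-- A's loop body, named for the lemmas below (definitionally the lambda in the port)
def pvStep (ql : String) (detected : List String) (kt : String × String) : List String :=
  if PySem.Str.isIn kt.1 ql && !(detected.contains kt.2) then detected ++ [kt.2] else detected

-- once the table is already detected, the rest of its keyword group is a no-op
theorem pv_fold_mem (ql t : String) (kws : List String) (acc : List String)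
    (h : t ∈ acc) :
    List.foldl (pvStep ql) acc (kws.map (fun k => (k, t))) = acc := by
  induction kws with
  | nil => rfl
  | cons k ks ih => simp [pvStep, h, ih]

-- a whole keyword group appends its table iff any of its keywords occurs
theorem pv_fold_group (ql t : String) (kws : List String) (acc : List String)
    (h : t ∉ acc) :
    List.foldl (pvStep ql) acc (kws.map (fun k => (k, t))) =
      if kws.any (fun k => PySem.Str.isIn k ql) then acc ++ [t] else acc := by
  induction kws with
  | nil => rfl
  | cons k ks ih =>
    simp only [List.map, List.foldl]
    by_cases hb : PySem.Str.isIn k ql = true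
    · have hb' : PySem.Chars.isIn k.toList ql.toList = true := by simpa using hb
      have hstep : pvStep ql acc (k, t) = acc ++ [t] := by simp [pvStep, hb', h]
      rw [hstep, pv_fold_mem ql t ks (acc ++ [t]) (by simp), List.any_cons]
      simp [hb']
    · have hb' : PySem.Chars.isIn k.toList ql.toList = false := by simpa using hb
      have hstep : pvStep ql acc (k, t) = acc := by simp [pvStep, hb']
      rw [hstep, ih, List.any_cons]
      simp [hb']

-- ===== VERDICT (by name: the statement is the Claim_ definition above) =====
set_option maxHeartbeats 1000000 in
theorem extract_tables_from_question_py_spec : Claim_equal_extract_tables_from_question_py := by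
  intro question _
  unfold Spec_extract_tables_from_question_py
  unfold extract_tables_from_question_py extract_tables_from_question_py_alt pvTableSynonyms
  dsimp only
  generalize PySem.Str.lower question = ql
  have hsplit : [("revenue", "revenue"), ("sales", "revenue"), ("income", "revenue"),
     ("region", "regions"), ("geography", "regions"), ("country", "regions"),
     ("time", "time_periods"), ("month", "time_periods"), ("year", "time_periods"),
     ("quarter", "time_periods"),
     ("customer", "customers"), ("client", "customers"),
     ("transaction", "transactions"), ("purchase", "transactions"), ("order", "transactions")]
    = (["revenue", "sales", "income"].map (fun k => (k, "revenue")))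
      ++ (["region", "geography", "country"].map (fun k => (k, "regions")))
      ++ (["time", "month", "year", "quarter"].map (fun k => (k, "time_periods")))
      ++ (["customer", "client"].map (fun k => (k, "customers")))
      ++ (["transaction", "purchase", "order"].map (fun k => (k, "transactions"))) := by rfl
  change List.foldl (pvStep ql) [] _ = _
  rw [hsplit, List.foldl_append, List.foldl_append, List.foldl_append, List.foldl_append]
  rw [pv_fold_group ql "revenue" _ _ (by simp)]
  rw [pv_fold_group ql "regions" _ _ (by (repeat' split) <;> simp)]
  rw [pv_fold_group ql "time_periods" _ _ (by (repeat' split) <;> simp)]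
  rw [pv_fold_group ql "customers" _ _ (by (repeat' split) <;> simp)]
  rw [pv_fold_group ql "transactions" _ _ (by (repeat' split) <;> simp)]
  simp only [List.filter_cons, List.filter_nil]
  by_cases h1 : (PySem.Str.isIn "revenue" ql || (PySem.Str.isIn "sales" ql || (PySem.Str.isIn "income" ql || false))) = true <;>
  by_cases h2 : (PySem.Str.isIn "region" ql || (PySem.Str.isIn "geography" ql || (PySem.Str.isIn "country" ql || false))) = true <;>
  by_cases h3 : (PySem.Str.isIn "time" ql || (PySem.Str.isIn "month" ql || (PySem.Str.isIn "year" ql || (PySem.Str.isIn "quarter" ql || false)))) = true <;>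
  by_cases h4 : (PySem.Str.isIn "customer" ql || (PySem.Str.isIn "client" ql || false)) = true <;>
  by_cases h5 : (PySem.Str.isIn "transaction" ql || (PySem.Str.isIn "purchase" ql || (PySem.Str.isIn "order" ql || false))) = true <;>
  simp_all
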